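-- pv_equiv track=rewrite | github.com/HxxdHenry/A-Maze-Ing | FF1.py | path_metrics
-- ===== SOURCE A (Python) =====
-- from typing import Dict, List, Tuple, Optional, Set
--
-- Cell = Tuple[int, int]
--
-- def step_dir(a: Cell, b: Cell) -> str:
--     dx = b[0] - a[0]
--     dy = b[1] - a[1]
--     if dx == 1 and dy == 0: return 'E'
--     if dx == -1 and dy == 0: return 'W'
--     if dx == 0 and dy == 1: return 'S'
--     if dx == 0 and dy == -1: return 'N'
--     return '?'
--
-- def path_metrics(path: List[Cell]) -> Tuple[int, int, int, List[str]]: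
--     tiles = len(path)
--     if tiles <= 1:
--         return tiles, 0, 0, []
--     dirs = [step_dir(path[i], path[i + 1]) for i in range(tiles - 1)]
--     turns = sum(1 for i in range(1, len(dirs)) if dirs[i] != dirs[i - 1])
--     # Longest straight run (in steps)
--     max_stretch = 1 if dirs else 0
--     run = 1
--     for i in range(1, len(dirs)):
--         if dirs[i] == dirs[i - 1]:
--             run += 1
--             max_stretch = max(max_stretch, run)
--         else:
--             run = 1
--     return tiles, turns, max_stretch, dirs
-- ===== SOURCE B (Python) =====
-- from typing import List, Tuple
-- from itertools import groupby
--
-- Cell = Tuple[int, int]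
--
-- def step_dir(a: Cell, b: Cell) -> str:
--     dx = b[0] - a[0]
--     dy = b[1] - a[1]
--     if dx == 1 and dy == 0: return 'E'
--     if dx == -1 and dy == 0: return 'W'
--     if dx == 0 and dy == 1: return 'S'
--     if dx == 0 and dy == -1: return 'N'
--     return '?'
--
-- def path_metrics(path: List[Cell]) -> Tuple[int, int, int, List[str]]:
--     tiles = len(path)
--     if tiles <= 1:
--         return tiles, 0, 0, []
--     dirs = [step_dir(a, b) for a, b in zip(path, path[1:])]
--     runs = [sum(1 for _ in g) for _, g in groupby(dirs)]
--     return tiles, len(runs) - 1, max(runs), dirs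
-- ===== Notes on version B (the rewrite author's own statement) =====
-- stated objective: idiomatic
-- what changed: B builds dirs with zip(path, path[1:]) and replaces A's two index-based scans (the turn-count sum and the stateful longest-run loop) by one groupby run-length decomposition: turns = len(runs) - 1 and max_stretch = max(runs).
import Mathlib
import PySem

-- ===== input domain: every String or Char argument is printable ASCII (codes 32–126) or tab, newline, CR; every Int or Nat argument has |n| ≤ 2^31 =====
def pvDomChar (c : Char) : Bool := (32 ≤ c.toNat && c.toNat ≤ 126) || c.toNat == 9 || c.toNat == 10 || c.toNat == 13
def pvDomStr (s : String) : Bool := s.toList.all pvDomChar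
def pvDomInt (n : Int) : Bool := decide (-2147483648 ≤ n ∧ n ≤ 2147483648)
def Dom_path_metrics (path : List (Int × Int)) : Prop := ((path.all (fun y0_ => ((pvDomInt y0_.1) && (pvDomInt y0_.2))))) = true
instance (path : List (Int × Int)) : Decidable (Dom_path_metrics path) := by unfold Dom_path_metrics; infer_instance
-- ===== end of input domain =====

-- B replaces A's two index-based scans (turn count + longest-run loop) by a groupby-style
-- run-length decomposition of the direction list (idiomatic; same cost).

-- ===== PORT A =====
-- shared helper (verbatim in both Source A and Source B)
def step_dir (a b : Int × Int) : String :=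
  let dx := b.1 - a.1
  let dy := b.2 - a.2
  if dx = 1 ∧ dy = 0 then "E"
  else if dx = -1 ∧ dy = 0 then "W"
  else if dx = 0 ∧ dy = 1 then "S"
  else if dx = 0 ∧ dy = -1 then "N"
  else "?"

def path_metrics (path : List (Int × Int)) : Int × Int × Int × List String :=
  let tiles : Int := path.length
  if tiles ≤ 1 then (tiles, 0, 0, [])
  else
    -- dirs = [step_dir(path[i], path[i+1]) for i in range(tiles - 1)]; indices are in range, so the default never fires
    let dirs : List String := (PySem.List.pyRange 0 (tiles - 1)).map
      (fun i => step_dir (PySem.List.pyGetD path i (0, 0)) (PySem.List.pyGetD path (i + 1) (0, 0)))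
    -- turns = sum(1 for i in range(1, len(dirs)) if dirs[i] != dirs[i-1])
    let turns : Int := (PySem.List.pyRange 1 (dirs.length : Int)).foldl
      (fun acc i => if PySem.List.pyGetD dirs i "" ≠ PySem.List.pyGetD dirs (i - 1) "" then acc + 1 else acc) 0
    let ms0 : Int := if dirs.isEmpty then 0 else 1
    let st := (PySem.List.pyRange 1 (dirs.length : Int)).foldl
      (fun (st : Int × Int) i =>
        if PySem.List.pyGetD dirs i "" = PySem.List.pyGetD dirs (i - 1) "" then
          (max st.1 (st.2 + 1), st.2 + 1)
        else (st.1, 1)) (ms0, 1)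
    (tiles, turns, st.1, dirs)

-- ===== PORT B =====
-- hand port of itertools.groupby(dirs) reduced to its run lengths
-- (runGo x k t: currently inside a group with key x of length k so far)
def runGo (x : String) (k : Int) : List String → List Int
  | [] => [k]
  | y :: t => if y = x then runGo x (k + 1) t else k :: runGo y 1 t

def runLengths : List String → List Int
  | [] => []
  | x :: t => runGo x 1 t

def path_metrics_alt (path : List (Int × Int)) : Int × Int × Int × List String :=
  let tiles : Int := path.length
  if tiles ≤ 1 then (tiles, 0, 0, [])
  else
    -- dirs = [step_dir(a, b) for a, b in zip(path, path[1:])]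
    let dirs : List String := (path.zip (path.drop 1)).map (fun p => step_dir p.1 p.2)
    let runs : List Int := runLengths dirs
    -- max(runs): runs is nonempty here, so the .getD 0 totalisation never fires
    (tiles, (runs.length : Int) - 1, (PySem.List.max? runs (fun x => x)).getD 0, dirs)

-- ===== PRECONDITION & SPEC =====
def Spec_path_metrics (path : List (Int × Int)) (out : Int × Int × Int × List String) : Prop := out = path_metrics_alt path
instance (path : List (Int × Int)) (out : Int × Int × Int × List String) : Decidable (Spec_path_metrics path out) := by unfold Spec_path_metrics; infer_instance

-- ===== CLAIM (what is proved, stated in full; the proofs are below) =====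
def Claim_equal_path_metrics : Prop := ∀ (path : List (Int × Int)), Dom_path_metrics path → Spec_path_metrics path (path_metrics path)


-- ===== LEMMAS AND PROOFS =====

-- range(1, n+1) as a shifted List.range
theorem pyRange_one_shift (n : Nat) :
    PySem.List.pyRange 1 ((n : Int) + 1) = (List.range n).map (fun k : Nat => ((k : Int) + 1)) := by
  induction n with
  | zero => decide
  | succ m ih =>
      have h : (1 : Int) ≤ (m : Int) + 1 := by omega
      have hc : ((m + 1 : Nat) : Int) + 1 = ((m : Int) + 1) + 1 := by push_cast; ring
      rw [hc, PySem.List.pyRange_one_succ_right h, ih, List.range_succ, List.map_append]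
      simp

-- a map over adjacent indexed pairs is a map over the zip with the tail
theorem map_range_adj {A G : Type} (dflt : A) (f : A → A → G) :
    ∀ (ds : List A),
      (List.range (ds.length - 1)).map (fun k => f (ds.getD k dflt) (ds.getD (k + 1) dflt))
        = (ds.zip (ds.drop 1)).map (fun p => f p.1 p.2) := by
  intro ds
  induction ds with
  | nil => simp
  | cons x t ih =>
      cases t with
      | nil => simp
      | cons y t' =>
          simp only [List.length_cons, Nat.add_sub_cancel, List.range_succ_eq_map,
            List.map_cons, List.map_map, List.drop_one, List.tail_cons, List.zip_cons_cons]
          refine congrArg₂ _ rfl ?_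
          have h := ih
          simp only [List.length_cons, Nat.add_sub_cancel, List.drop_one, List.tail_cons] at h
          rw [← h]
          apply List.map_congr_left
          intro k _
          simp [Function.comp]

-- a fold over adjacent indexed pairs is a fold over the zip with the tail
theorem foldl_range_adj {A B : Type} (dflt : A) (g : B → A → A → B) :
    ∀ (ds : List A) (s : B),
      (List.range (ds.length - 1)).foldl (fun s k => g s (ds.getD k dflt) (ds.getD (k + 1) dflt)) s
        = (ds.zip (ds.drop 1)).foldl (fun s p => g s p.1 p.2) s := by
  intro ds
  induction ds with
  | nil => simp
  | cons x t ih =>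
      cases t with
      | nil => simp
      | cons y t' =>
          intro s
          simp only [List.length_cons, Nat.add_sub_cancel, List.range_succ_eq_map,
            List.foldl_cons, List.foldl_map, List.drop_one, List.tail_cons, List.zip_cons_cons]
          have h := ih (g s x y)
          simp only [List.length_cons, Nat.add_sub_cancel, List.drop_one, List.tail_cons] at h
          rw [← h]
          congr 1

-- PySem.List.max? on Int with identity key is the running maximum
theorem max?_cons_eq (x : Int) (xs : List Int) :
    PySem.List.max? (x :: xs) (fun v => v) = some (List.foldl max x xs) := by
  simp only [PySem.List.max?, List.foldl_cons]
  induction xs generalizing x with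
  | nil => rfl
  | cons y t ih =>
      simp only [List.foldl_cons]
      by_cases h : x < y
      · rw [if_pos h, ih, max_eq_right (le_of_lt h)]
      · rw [if_neg h, ih, max_eq_left (not_lt.mp h)]

theorem runGo_length_pos : ∀ (t : List String) (x : String) (k : Int),
    0 < (runGo x k t).length := by
  intro t
  induction t with
  | nil => intro x k; simp [runGo]
  | cons y t' ih =>
      intro x k
      by_cases h : y = x
      · simp only [runGo, if_pos h]; exact ih x (k + 1)
      · simp [runGo, if_neg h]

theorem runGo_head_ge : ∀ (t : List String) (x : String) (k r : Int) (rs : List Int),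
    runGo x k t = r :: rs → k ≤ r := by
  intro t
  induction t with
  | nil => intro x k r rs h; simp only [runGo, List.cons.injEq] at h; omega
  | cons y t' ih =>
      intro x k r rs h
      by_cases hy : y = x
      · rw [runGo, if_pos hy] at h
        have := ih x (k + 1) r rs h
        omega
      · rw [runGo, if_neg hy] at h
        simp only [List.cons.injEq] at h
        omega

-- A's turn-count fold equals (number of groups) - 1
theorem turns_runGo : ∀ (t : List String) (d : String) (acc k : Int),
    ((d :: t).zip t).foldl (fun acc p => if p.2 ≠ p.1 then acc + 1 else acc) acc
      = acc + ((runGo d k t).length : Int) - 1 := by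
  intro t
  induction t with
  | nil => intro d acc k; simp [runGo]
  | cons y t' ih =>
      intro d acc k
      rw [List.zip_cons_cons, List.foldl_cons]
      by_cases h : y = d
      · have hc : (if ((d, y) : String × String).2 ≠ ((d, y) : String × String).1 then acc + 1 else acc) = acc := by
          simp [h]
        have hg : runGo d k (y :: t') = runGo d (k + 1) t' := by simp [runGo, h]
        rw [hc, hg, h]
        exact ih d acc (k + 1)
      · have hc : (if ((d, y) : String × String).2 ≠ ((d, y) : String × String).1 then acc + 1 else acc) = acc + 1 := by
          simp [h]
        have hg : runGo d k (y :: t') = k :: runGo y 1 t' := by simp [runGo, h]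
        rw [hc, hg, ih y (acc + 1) 1]
        have hlen := runGo_length_pos t' y 1
        simp only [List.length_cons]
        push_cast
        omega

-- every run length produced from an open group of size k keeps the fold-max at least k
theorem le_foldl_max_runGo : ∀ (t : List String) (x : String) (k a : Int),
    k ≤ List.foldl max a (runGo x k t) := by
  intro t
  induction t with
  | nil => intro x k a; simp [runGo]
  | cons y t' ih =>
      intro x k a
      by_cases h : y = x
      · simp only [runGo, if_pos h]
        exact le_trans (by omega) (ih x (k + 1) a)
      · simp only [runGo, if_neg h, List.foldl_cons]
        calc k ≤ max a k := le_max_right a k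
          _ ≤ List.foldl max (max a k) (runGo y 1 t') := (PySem.List.le_foldl_max _ _).1

theorem foldl_max_absorb (l : List Int) : ∀ (a c : Int),
    List.foldl max (max a c) l = max (List.foldl max a l) c := by
  induction l with
  | nil => intro a c; rfl
  | cons x t ih => intro a c; simp only [List.foldl_cons, max_right_comm a c x, ih]

-- A's longest-run fold equals the fold-maximum of the run lengths
theorem max_runGo : ∀ (t : List String) (d : String) (ms run : Int), 1 ≤ run → run ≤ ms →
    (((d :: t).zip t).foldl (fun (st : Int × Int) p =>
        if p.2 = p.1 then (max st.1 (st.2 + 1), st.2 + 1) else (st.1, 1)) (ms, run)).1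
      = List.foldl max ms (runGo d run t) := by
  intro t
  induction t with
  | nil => intro d ms run h1 h2; simp [runGo, max_eq_left h2]
  | cons y t' ih =>
      intro d ms run h1 h2
      rw [List.zip_cons_cons, List.foldl_cons]
      by_cases h : y = d
      · have hc : (if ((d, y) : String × String).2 = ((d, y) : String × String).1 then
              ((max ms (run + 1), run + 1) : Int × Int) else (ms, 1)) = (max ms (run + 1), run + 1) := by
          simp [h]
        have hg : runGo d run (y :: t') = runGo d (run + 1) t' := by simp [runGo, h]
        rw [hc, hg, h, ih d (max ms (run + 1)) (run + 1) (by omega) (le_max_right _ _),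
          foldl_max_absorb]
        exact max_eq_left (le_foldl_max_runGo t' d (run + 1) ms)
      · have hc : (if ((d, y) : String × String).2 = ((d, y) : String × String).1 then
              ((max ms (run + 1), run + 1) : Int × Int) else (ms, 1)) = (ms, 1) := by
          simp [h]
        have hg : runGo d run (y :: t') = run :: runGo y 1 t' := by simp [runGo, h]
        rw [hc, hg, ih y ms 1 le_rfl (by omega), List.foldl_cons, max_eq_left h2]

-- A's indexed turn scan on a nonempty direction list, in B's terms
theorem turnsA_eq (d : String) (t : List String) :
    (PySem.List.pyRange 1 (((d :: t).length : Nat) : Int)).foldl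
      (fun acc i => if PySem.List.pyGetD (d :: t) i "" ≠ PySem.List.pyGetD (d :: t) (i - 1) "" then acc + 1 else acc) (0 : Int)
      = ((runLengths (d :: t)).length : Int) - 1 := by
  have hlen1 : (((d :: t).length : Nat) : Int) = ((t.length : Nat) : Int) + 1 := by simp
  rw [hlen1, pyRange_one_shift t.length, List.foldl_map]
  have hfun : (fun (acc : Int) (k : Nat) =>
        if PySem.List.pyGetD (d :: t) ((k : Int) + 1) "" ≠ PySem.List.pyGetD (d :: t) ((k : Int) + 1 - 1) "" then acc + 1 else acc)
      = (fun (acc : Int) (k : Nat) =>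
        if (d :: t).getD (k + 1) "" ≠ (d :: t).getD k "" then acc + 1 else acc) := by
    funext acc k
    rw [show ((k : Int) + 1) = ((k + 1 : Nat) : Int) by push_cast; ring, PySem.List.pyGetD_natCast,
      show (((k + 1 : Nat) : Int) - 1) = ((k : Nat) : Int) by push_cast; ring, PySem.List.pyGetD_natCast]
  rw [hfun]
  have h3 := foldl_range_adj "" (fun (acc : Int) p q => if q ≠ p then acc + 1 else acc) (d :: t) (0 : Int)
  simp only [List.length_cons, Nat.add_sub_cancel, List.drop_one, List.tail_cons] at h3
  rw [h3, turns_runGo t d 0 1, runLengths]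
  ring

-- A's indexed longest-run scan on a nonempty direction list, in B's terms
theorem msA_eq (d : String) (t : List String) :
    ((PySem.List.pyRange 1 (((d :: t).length : Nat) : Int)).foldl
      (fun (st : Int × Int) i =>
        if PySem.List.pyGetD (d :: t) i "" = PySem.List.pyGetD (d :: t) (i - 1) "" then
          (max st.1 (st.2 + 1), st.2 + 1)
        else (st.1, 1)) ((if (d :: t).isEmpty then (0 : Int) else 1), 1)).1
      = (PySem.List.max? (runLengths (d :: t)) (fun v => v)).getD 0 := by
  have hinit : ((if (d :: t).isEmpty then (0 : Int) else 1) : Int) = 1 := by simp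
  have hlen1 : (((d :: t).length : Nat) : Int) = ((t.length : Nat) : Int) + 1 := by simp
  rw [hinit, hlen1, pyRange_one_shift t.length, List.foldl_map]
  have hfun : (fun (st : Int × Int) (k : Nat) =>
        if PySem.List.pyGetD (d :: t) ((k : Int) + 1) "" = PySem.List.pyGetD (d :: t) ((k : Int) + 1 - 1) "" then
          (max st.1 (st.2 + 1), st.2 + 1)
        else (st.1, 1))
      = (fun (st : Int × Int) (k : Nat) =>
        if (d :: t).getD (k + 1) "" = (d :: t).getD k "" then
          (max st.1 (st.2 + 1), st.2 + 1)
        else (st.1, 1)) := by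
    funext st k
    rw [show ((k : Int) + 1) = ((k + 1 : Nat) : Int) by push_cast; ring, PySem.List.pyGetD_natCast,
      show (((k + 1 : Nat) : Int) - 1) = ((k : Nat) : Int) by push_cast; ring, PySem.List.pyGetD_natCast]
  rw [hfun]
  have h3 := foldl_range_adj "" (fun (st : Int × Int) p q =>
      if q = p then (max st.1 (st.2 + 1), st.2 + 1) else (st.1, 1)) (d :: t) ((1 : Int), (1 : Int))
  simp only [List.length_cons, Nat.add_sub_cancel, List.drop_one, List.tail_cons] at h3
  rw [h3, max_runGo t d 1 1 le_rfl le_rfl, runLengths]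
  cases hg : runGo d 1 t with
  | nil =>
      exact absurd hg (by
        have h0 := runGo_length_pos t d 1
        intro hcon
        rw [hcon] at h0
        simp at h0)
  | cons r rs =>
      have h1r : (1 : Int) ≤ r := runGo_head_ge t d 1 r rs hg
      rw [max?_cons_eq, Option.getD_some, List.foldl_cons, max_eq_right h1r]

-- ===== VERDICT (by name: the statement is the Claim_ definition above) =====
theorem path_metrics_spec : Claim_equal_path_metrics := by
  intro path _
  unfold Spec_path_metrics path_metrics path_metrics_alt
  match path with
  | [] => rfl
  | [x] => rfl
  | a :: b :: rest =>
    have hlen : ¬ ((((a :: b :: rest).length : Nat) : Int) ≤ 1) := by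
      simp only [List.length_cons]; push_cast; omega
    simp only [hlen, if_false]
    have hcast : (((a :: b :: rest).length : Nat) : Int) - 1 = ((rest.length + 1 : Nat) : Int) := by
      simp only [List.length_cons]; push_cast; ring
    have hdirs :
        (PySem.List.pyRange 0 ((((a :: b :: rest).length : Nat) : Int) - 1)).map
          (fun i => step_dir (PySem.List.pyGetD (a :: b :: rest) i (0, 0))
                             (PySem.List.pyGetD (a :: b :: rest) (i + 1) (0, 0)))
        = ((a :: b :: rest).zip ((a :: b :: rest).drop 1)).map (fun p => step_dir p.1 p.2) := by
      rw [hcast, PySem.List.pyRange_zero_natCast, List.map_map]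
      have hstep : ∀ k : Nat,
          step_dir (PySem.List.pyGetD (a :: b :: rest) ((k : Nat) : Int) (0, 0))
                   (PySem.List.pyGetD (a :: b :: rest) (((k : Nat) : Int) + 1) (0, 0))
          = step_dir ((a :: b :: rest).getD k (0, 0)) ((a :: b :: rest).getD (k + 1) (0, 0)) := by
        intro k
        rw [PySem.List.pyGetD_natCast,
          show (((k : Nat) : Int) + 1) = ((k + 1 : Nat) : Int) by push_cast; ring,
          PySem.List.pyGetD_natCast]
      calc (List.range (rest.length + 1)).map
              ((fun i => step_dir (PySem.List.pyGetD (a :: b :: rest) i (0, 0))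
                  (PySem.List.pyGetD (a :: b :: rest) (i + 1) (0, 0))) ∘ (fun k : Nat => (k : Int)))
          = (List.range ((a :: b :: rest).length - 1)).map
              (fun k => step_dir ((a :: b :: rest).getD k (0, 0)) ((a :: b :: rest).getD (k + 1) (0, 0))) := by
            apply List.map_congr_left
            intro k _
            exact hstep k
        _ = _ := map_range_adj (0, 0) step_dir (a :: b :: rest)
    rw [hdirs]
    obtain ⟨d, t, hdt⟩ : ∃ d t,
        ((a :: b :: rest).zip ((a :: b :: rest).drop 1)).map (fun p => step_dir p.1 p.2) = d :: t :=
      ⟨_, _, rfl⟩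
    rw [hdt, turnsA_eq d t, msA_eq d t]
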